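-- pv_equiv track=rewrite | github.com/dstine/aoc | aoc_2018/day02.py | count
-- ===== SOURCE A (Python) =====
-- def count(id):
--     counts = {}
--     for c in id:
--         if c in counts.keys():
--             counts[c] += 1
--         else:
--             counts[c] = 1
--     has_double = False
--     has_triple = False
--     for c, count in counts.items():
--         if count == 2:
--             has_double = True
--         elif count == 3:
--             has_triple = True
--     return (has_double, has_triple)
-- ===== SOURCE B (Python) =====
-- def count(id):
--     cs = list(id)
--     distinct = set(cs)
--     return (any(cs.count(c) == 2 for c in distinct),
--             any(cs.count(c) == 3 for c in distinct))
-- ===== Notes on version B (the rewrite author's own statement) =====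
-- stated objective: simpler
-- what changed: Replaces the dict frequency table and the two flag-setting loops with direct membership tests that ask, for each distinct character, whether it occurs exactly 2 or exactly 3 times.
import Mathlib
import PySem

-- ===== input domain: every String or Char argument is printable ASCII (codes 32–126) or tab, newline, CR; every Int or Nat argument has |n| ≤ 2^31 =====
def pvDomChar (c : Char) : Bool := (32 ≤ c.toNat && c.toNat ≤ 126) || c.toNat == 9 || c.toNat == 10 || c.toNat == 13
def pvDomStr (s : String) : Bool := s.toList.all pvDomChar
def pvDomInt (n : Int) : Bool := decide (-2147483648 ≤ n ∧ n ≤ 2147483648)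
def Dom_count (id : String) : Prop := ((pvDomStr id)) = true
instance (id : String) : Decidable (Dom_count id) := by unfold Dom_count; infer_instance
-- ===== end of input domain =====

-- B replaces A's dict frequency table and flag loops with two direct 'any' membership tests; return value only, no speed claim.

-- ===== PORT A =====
-- for c in id: if c in counts: counts[c] += 1 else counts[c] = 1
def countStep (d : PySem.Dict Char Int) (c : Char) : PySem.Dict Char Int :=
  if d.contains c then d.modify c 0 (· + 1) else d.insert c 1

-- for c, count in counts.items(): if count == 2: has_double = True elif count == 3: has_triple = True
def flagStep (s : Bool × Bool) (p : Char × Int) : Bool × Bool :=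
  if p.2 == 2 then (true, s.2) else if p.2 == 3 then (s.1, true) else s

def count (id : String) : Bool × Bool :=
  let counts := id.toList.foldl countStep PySem.Dict.empty
  counts.items.foldl flagStep (false, false)

-- ===== PORT B =====
def count_alt (id : String) : Bool × Bool :=
  let cs := id.toList
  let distinct := PySem.Set.ofList cs
  (distinct.any (fun c => cs.count c == 2), distinct.any (fun c => cs.count c == 3))

-- ===== PRECONDITION & SPEC =====
def Spec_count (id : String) (out : Bool × Bool) : Prop := out = count_alt id
instance (id : String) (out : Bool × Bool) : Decidable (Spec_count id out) := by unfold Spec_count; infer_instance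

-- ===== CLAIM (what is proved, stated in full; the proofs are below) =====
def Claim_equal_count : Prop := ∀ (id : String), Dom_count id → Spec_count id (count id)

-- ===== LEMMAS AND PROOFS =====

-- A's counting loop builds exactly Counter(id)
theorem countStep_eq_counter (l : List Char) :
    l.foldl countStep PySem.Dict.empty = PySem.Dict.counter l := by
  rw [← PySem.Dict.foldl_insert_getD_add_one_eq_counter]
  apply PySem.List.foldl_congr_mem
  intro d c _
  unfold countStep
  by_cases h : d.contains c = true
  · simp [h, PySem.Dict.modify]
  · simp [h, PySem.Dict.getD_of_not_contains d 0 (by simpa using h)]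

-- A's flag loop sets each flag iff some item has that exact value
theorem flag_fold (items : List (Char × Int)) (a b : Bool) :
    items.foldl flagStep (a, b) =
      (a || items.any (fun p => p.2 == 2), b || items.any (fun p => p.2 == 3)) := by
  induction items generalizing a b with
  | nil => simp
  | cons p t ih =>
      rw [List.foldl_cons, List.any_cons, List.any_cons]
      by_cases h2 : p.2 = 2
      · rw [show flagStep (a, b) p = (true, b) from by simp [flagStep, h2], ih]
        simp [h2]
      · by_cases h3 : p.2 = 3
        · rw [show flagStep (a, b) p = (a, true) from by simp [flagStep, h3], ih]
          simp [h3]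
        · rw [show flagStep (a, b) p = (a, b) from by simp [flagStep, h2, h3], ih,
            show (p.2 == 2) = false from by simpa using h2,
            show (p.2 == 3) = false from by simpa using h3]
          simp

theorem any_ofList {α : Type} [DecidableEq α] (l : List α) (p : α → Bool) :
    (PySem.Set.ofList l).any p = l.any p := by
  refine Bool.eq_iff_iff.mpr ?_
  simp only [List.any_eq_true, PySem.Set.mem_ofList]

-- ===== VERDICT (by name: the statement is the Claim_ definition above) =====
theorem count_spec : Claim_equal_count := by
  intro id _
  unfold Spec_count count count_alt
  simp only [countStep_eq_counter, PySem.Dict.items_counter, flag_fold,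
    List.any_map, Function.comp_def, Bool.false_or, any_ofList]
  refine Prod.ext ?_ ?_ <;>
    · refine Bool.eq_iff_iff.mpr ?_
      simp only [List.any_eq_true]
      constructor <;> rintro ⟨c, hc, h⟩ <;> refine ⟨c, hc, ?_⟩ <;>
        · simp only [beq_iff_eq] at h ⊢
          omega
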